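-- pv_equiv track=rewrite | github.com/Lemi-in/Codeforces-daily | C_Little_Girl_and_Maximum_Sum.py | mx_sum
-- ===== SOURCE A (Python) =====
-- def mx_sum(n, q, arr, queries):
--     diff = [0] * (n + 2)
--     for l, r in queries:
--         diff[l] += 1
--         diff[r + 1] -= 1
--
--     prefix = [0] * (n + 1)
--     for i in range(1, n + 1):
--         prefix[i] = prefix[i - 1] + diff[i]
--
--     arr.sort(reverse=True)
--     prefix = prefix[1:]
--     prefix.sort(reverse=True)
--
--     mx = 0
--     for i in range(n):
--         mx += arr[i] * prefix[i]
--
--     return mx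
-- ===== SOURCE B (Python) =====
-- def mx_sum(n, q, arr, queries):
--     delta = [0] * (n + 2)
--     for l, r in queries:
--         delta[l] += 1
--         delta[r + 1] -= 1
--     cnt = sorted((sum(delta[1:i + 1]) for i in range(1, n + 1)), reverse=True)
--     arr.sort(reverse=True)
--     return sum(a * c for a, c in zip(arr, cnt))
-- ===== Notes on version B (the rewrite author's own statement) =====
-- stated objective: simpler
-- what changed: Keeps the per-query event tallies but replaces the prefix-sum table with direct per-position accumulation (summing delta[1:i+1] for each position) and the indexed pairing loop with a zip-sum over the two descending-sorted lists.
import Mathlib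
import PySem

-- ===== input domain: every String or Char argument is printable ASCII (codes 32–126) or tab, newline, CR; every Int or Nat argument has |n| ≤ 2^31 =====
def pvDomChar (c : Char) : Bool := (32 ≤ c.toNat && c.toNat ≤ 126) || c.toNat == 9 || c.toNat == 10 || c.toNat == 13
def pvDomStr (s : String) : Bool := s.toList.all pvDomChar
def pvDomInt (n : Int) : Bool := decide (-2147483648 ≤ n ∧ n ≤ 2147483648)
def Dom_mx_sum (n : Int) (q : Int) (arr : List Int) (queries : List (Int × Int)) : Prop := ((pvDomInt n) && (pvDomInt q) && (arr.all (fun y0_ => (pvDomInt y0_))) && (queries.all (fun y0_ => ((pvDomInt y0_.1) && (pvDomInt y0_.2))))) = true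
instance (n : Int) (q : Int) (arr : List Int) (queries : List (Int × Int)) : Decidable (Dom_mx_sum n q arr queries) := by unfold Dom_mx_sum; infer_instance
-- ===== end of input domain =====

-- B keeps the per-query event tallies but accumulates each position's coverage directly from the
-- tally slice delta[1:i+1] instead of A's prefix-sum table, and pairs the two descending-sorted
-- lists with a zip-sum instead of A's indexed loop.
-- Both Pythons sort arr in place — the equivalence proved here is about the return value.

-- ===== PORT A =====
-- diff[l] += 1 ; diff[r+1] -= 1  (one query of A's first loop)
def pvDiffStep (d : List Int) (lr : Int × Int) : List Int :=
  let d1 := PySem.List.pySetD d lr.1 (PySem.List.pyGetD d lr.1 0 + 1)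
  PySem.List.pySetD d1 (lr.2 + 1) (PySem.List.pyGetD d1 (lr.2 + 1) 0 - 1)

-- prefix[i] = prefix[i-1] + diff[i]  (one step of A's second loop)
def pvPrefixStep (diff : List Int) (p : List Int) (i : Int) : List Int :=
  PySem.List.pySetD p i (PySem.List.pyGetD p (i - 1) 0 + PySem.List.pyGetD diff i 0)

def mx_sum (n : Int) (q : Int) (arr : List Int) (queries : List (Int × Int)) : Int :=
  let diff := queries.foldl pvDiffStep (List.replicate (n + 2).toNat 0)
  let prefix1 := (PySem.List.pyRange 1 (n + 1) 1).foldl (pvPrefixStep diff)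
      (List.replicate (n + 1).toNat 0)
  let arrS := PySem.List.sorted arr (fun x => x) true
  let prefix2 := PySem.List.sorted (PySem.List.slice prefix1 (some 1) none) (fun x => x) true
  (PySem.List.pyRange 0 n 1).foldl (fun mx i =>
      mx + PySem.List.pyGetD arrS i 0 * PySem.List.pyGetD prefix2 i 0) 0

-- ===== PORT B =====
-- delta[l] += 1 ; delta[r+1] -= 1  (one query of B's tally loop)
def pvTallyStep (d : List Int) (lr : Int × Int) : List Int :=
  let d1 := PySem.List.pySetD d lr.1 (PySem.List.pyGetD d lr.1 0 + 1)
  PySem.List.pySetD d1 (lr.2 + 1) (PySem.List.pyGetD d1 (lr.2 + 1) 0 - 1)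

def mx_sum_alt (n : Int) (q : Int) (arr : List Int) (queries : List (Int × Int)) : Int :=
  let delta := queries.foldl pvTallyStep (List.replicate (n + 2).toNat 0)
  let cnt := PySem.List.sorted ((PySem.List.pyRange 1 (n + 1) 1).map (fun i =>
      (PySem.List.slice delta (some 1) (some (i + 1))).sum)) (fun x => x) true
  let arrS := PySem.List.sorted arr (fun x => x) true
  ((arrS.zip cnt).map (fun p => p.1 * p.2)).sum

-- ===== PRECONDITION & SPEC =====
-- Pre_ is exactly A's no-raise domain: n ≤ len(arr) (A indexes arr[i] for i < n) and every
-- query's two write indices l and r+1 are valid Python indices of the length-(n+2) diff list.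
def Pre_mx_sum (n : Int) (q : Int) (arr : List Int) (queries : List (Int × Int)) : Prop :=
  n ≤ arr.length ∧ ∀ lr ∈ queries,
    PySem.Raise.InRange (n + 2).toNat lr.1 ∧ PySem.Raise.InRange (n + 2).toNat (lr.2 + 1)
instance (n : Int) (q : Int) (arr : List Int) (queries : List (Int × Int)) : Decidable (Pre_mx_sum n q arr queries) := by unfold Pre_mx_sum; infer_instance

def pvWitness_mx_sum : Int × Int × List Int × (List (Int × Int)) := (3, 2, [5, 2, 1], [(1, 2), (2, 3)])

def Spec_mx_sum (n : Int) (q : Int) (arr : List Int) (queries : List (Int × Int)) (out : Int) : Prop := out = mx_sum_alt n q arr queries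
instance (n : Int) (q : Int) (arr : List Int) (queries : List (Int × Int)) (out : Int) : Decidable (Spec_mx_sum n q arr queries out) := by unfold Spec_mx_sum; infer_instance

-- ===== CLAIM (what is proved, stated in full; the proofs are below) =====
def Claim_equal_mx_sum : Prop := ∀ (n : Int) (q : Int) (arr : List Int) (queries : List (Int × Int)), Dom_mx_sum n q arr queries → Pre_mx_sum n q arr queries → Spec_mx_sum n q arr queries (mx_sum n q arr queries)

-- ===== LEMMAS AND PROOFS =====

-- running prefix sums of a cell function
def pvS (D : Nat → Int) : Nat → Int
  | 0 => 0
  | j + 1 => pvS D j + D (j + 1)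

theorem pvTally_eq_diff : pvTallyStep = pvDiffStep := rfl

theorem pvSetAppendLength (l1 l2 : List Int) (i : Nat) (v : Int) (h : i = l1.length) :
    (l1 ++ l2).set i v = l1 ++ l2.set 0 v := by
  subst h
  induction l1 with
  | nil => simp
  | cons a t ih => simp [ih]

theorem pvPrefixFold (diff : List Int) (N m : Nat) (hm : m ≤ N) :
    (PySem.List.pyRange 1 ((m : Int) + 1) 1).foldl (pvPrefixStep diff)
        (List.replicate (N + 1) 0)
      = (List.range (m + 1)).map (pvS (fun j => PySem.List.pyGetD diff (j : Int) 0))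
          ++ List.replicate (N - m) 0 := by
  induction m with
  | zero =>
      rw [PySem.List.pyRange_one_eq_nil (by norm_num)]
      simp [pvS, List.replicate_succ]
  | succ m ih =>
      have hmN : m + 1 ≤ N := hm
      rw [show ((m + 1 : Nat) : Int) + 1 = ((m : Int) + 1) + 1 by push_cast; ring,
        PySem.List.pyRange_one_succ_right (by omega), List.foldl_append, ih (by omega)]
      simp only [List.foldl_cons, List.foldl_nil, pvPrefixStep]
      rw [show (m : Int) + 1 - 1 = ((m : Nat) : Int) by ring,
        show (m : Int) + 1 = ((m + 1 : Nat) : Int) by push_cast; ring,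
        PySem.List.pyGetD_natCast, PySem.List.pySetD_natCast]
      have hget : (((List.range (m + 1)).map (pvS fun j => PySem.List.pyGetD diff (j : Int) 0))
          ++ List.replicate (N - m) 0).getD m 0
          = pvS (fun j => PySem.List.pyGetD diff (j : Int) 0) m := by
        rw [List.getD_append _ _ _ _ (by simp)]
        simp [List.getD_eq_getElem?_getD]
      rw [hget]
      rw [pvSetAppendLength _ _ _ _ (by simp)]
      have hrep : List.replicate (N - m) (0 : Int) = 0 :: List.replicate (N - (m + 1)) 0 := by
        rw [show N - m = (N - (m + 1)) + 1 by omega, List.replicate_succ]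
      rw [hrep]
      simp only [List.range_succ, List.map_append, List.map_cons, List.map_nil, pvS,
        List.set_cons_zero, List.append_assoc, List.cons_append, List.nil_append]

-- sum of the slice xs[1:i+1] is the running prefix sum of the cells of xs
theorem pvTailTakeSum (xs : List Int) (i : Nat) :
    ((xs.drop 1).take i).sum = pvS (fun j => xs.getD j 0) i := by
  induction i with
  | zero => simp [pvS]
  | succ i ih =>
      rw [List.take_succ, List.sum_append, ih, pvS]
      have hidx : (xs.drop 1)[i]? = xs[i + 1]? := by
        rw [List.getElem?_drop]
        congr 1
        omega
      cases h : xs[i + 1]? <;>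
        simp [hidx, h, List.getD_eq_getElem?_getD]

-- B's zip-sum equals the indexed sum over the shorter list's range
theorem pvZipSum (a c : List Int) (h : c.length ≤ a.length) :
    ((a.zip c).map (fun p => p.1 * p.2)).sum
      = ((List.range c.length).map (fun k => a.getD k 0 * c.getD k 0)).sum := by
  induction c generalizing a with
  | nil => simp
  | cons x cs ih =>
      cases a with
      | nil => simp at h
      | cons y as =>
          simp only [List.zip_cons_cons, List.map_cons, List.sum_cons, List.length_cons]
          rw [ih as (by simpa using h), List.range_succ_eq_map]
          simp [Function.comp_def]

-- ===== VERDICT (by name: the statement is the Claim_ definition above) =====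
theorem mx_sum_spec : Claim_equal_mx_sum := by
  intro n q arr queries _ hpre
  obtain ⟨hna, _⟩ := hpre
  unfold Spec_mx_sum
  by_cases hn0 : 0 ≤ n
  case neg =>
    -- n < 0: both final sums run over empty ranges
    have h1 : PySem.List.pyRange 0 n 1 = [] := PySem.List.pyRange_one_eq_nil (by omega)
    have h2 : PySem.List.pyRange 1 (n + 1) 1 = [] := PySem.List.pyRange_one_eq_nil (by omega)
    simp [mx_sum, mx_sum_alt, h1, h2,
      show PySem.List.sorted ([] : List Int) (fun x => x) true = [] from rfl]
  case pos =>
  obtain ⟨N, rfl⟩ : ∃ N : Nat, n = (N : Int) := ⟨n.toNat, by omega⟩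
  unfold mx_sum mx_sum_alt
  rw [pvTally_eq_diff]
  dsimp only
  have h1 : ((N : Int) + 1).toNat = N + 1 := by omega
  rw [h1]
  set diff := queries.foldl pvDiffStep (List.replicate ((N : Int) + 2).toNat (0 : Int)) with hdiffdef
  rw [pvPrefixFold diff N N le_rfl, Nat.sub_self, List.replicate_zero, List.append_nil,
    PySem.List.slice_from_one, List.range_succ_eq_map]
  simp only [List.map_cons, List.tail_cons, List.map_map]
  rw [PySem.List.pyRange_one 1 ((N : Int) + 1)]
  have hNN : ((N : Int) + 1 - 1).toNat = N := by omega
  rw [hNN, List.map_map]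
  -- the unsorted frequency lists of A (prefix[1:]) and B (cnt before sorting) coincide
  have hmaps : (List.range N).map ((pvS fun j => PySem.List.pyGetD diff (j : Int) 0) ∘ Nat.succ)
      = (List.range N).map ((fun i => (PySem.List.slice diff (some 1) (some (i + 1))).sum)
          ∘ (fun k : Nat => (1 : Int) + (k : Int))) := by
    apply List.map_congr_left
    intro k _
    simp only [Function.comp_def, Nat.succ_eq_add_one]
    rw [show (1 : Int) + (k : Int) + 1 = ((k + 2 : Nat) : Int) by push_cast; ring,
      show (1 : Int) = ((1 : Nat) : Int) by norm_num,
      PySem.List.slice_natCast, pvTailTakeSum]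
    rw [show k + 2 - 1 = k + 1 by omega]
    have : ∀ j : Nat, diff.getD j 0 = PySem.List.pyGetD diff (j : Int) 0 := by
      intro j; rw [PySem.List.pyGetD_natCast]
    simp only [this]
  rw [hmaps]
  -- both pairing phases are the same indexed sum
  set P := PySem.List.sorted ((List.range N).map
      ((fun i => (PySem.List.slice diff (some 1) (some (i + 1))).sum)
        ∘ (fun k : Nat => (1 : Int) + (k : Int)))) (fun x => x) true with hPdef
  set A := PySem.List.sorted arr (fun x => x) true with hAdef
  have hPlen : P.length = N := by
    rw [hPdef, PySem.List.length_sorted, List.length_map, List.length_range]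
  have hAlen : N ≤ A.length := by
    rw [hAdef, PySem.List.length_sorted]; omega
  rw [pvZipSum A P (by omega), hPlen, PySem.List.foldl_add, zero_add,
    PySem.List.pyRange_one 0 (N : Int)]
  have hN0 : ((N : Int) - 0).toNat = N := by omega
  rw [hN0, List.map_map]
  apply congrArg
  apply List.map_congr_left
  intro k hk
  simp only [Function.comp_def, zero_add]
  rw [PySem.List.pyGetD_natCast, PySem.List.pyGetD_natCast]
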